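-- pv_equiv track=rewrite | github.com/jcmiller11/PSBS | psbs/psparser.py | __resolve_dict
-- ===== SOURCE A (Python) =====
-- def __resolve_dict(input_dict, synonyms=None):
--     """
--     Private utility method to recursively resolve references in a dictionary.
--
--     This method recursively resolves synonyms in a given dictionary. It
--     iterates through the dictionary, replacing values with their
--     corresponding values from synonyms or from the dictionary itself.
--
--     Args:
--         input_dict (dict): The dictionary to be resolved.
--         synonyms (dict, optional): A dictionary containing synonym mappings.
--         Defaults to None.
--
--     Returns:
--         dict: The resolved dictionary with synonyms replaced by their
--         corresponding values.
--     """
--     output = {}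
--
--     while True:  # Continue resolving until no changes occur
--         changed = False
--
--         # Iterate through items in the input_dict
--         for key, values in input_dict.items():
--             resolved_values = []
--
--             # Iterate through values of the current key
--             for value in values:
--                 if value in input_dict:
--                     resolved_values.extend(input_dict[value])
--                     changed = True
--                 elif synonyms:
--                     # Use synonyms if value is not in input_dict
--                     resolved_values.append(synonyms.get(value, value))
--
--             output[key] = resolved_values
--
--         # If no changes occurred in this iteration, exit the loop
--         if not changed:
--             return output
--
--         # Set input_dict to output to continue with updated values
--         input_dict = output
-- ===== SOURCE B (Python) =====
-- def __resolve_dict(input_dict, synonyms=None):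
--     """Memoized depth-first expansion: resolve each key once, directly to
--     terminal values, instead of repeated whole-dictionary substitution passes."""
--     memo = {}
--
--     def expand(key):
--         if key in memo:
--             return memo[key]
--         result = []
--         for value in input_dict[key]:
--             if value in input_dict:
--                 result.extend(expand(value))
--             elif synonyms:
--                 result.append(synonyms.get(value, value))
--         memo[key] = result
--         return result
--
--     return {key: expand(key) for key in input_dict}
-- ===== Notes on version B (the rewrite author's own statement) =====
-- stated objective: alternative
-- what changed: Replaces A's repeated whole-dictionary substitution rounds (iterate until no value is a key) by a single memoized depth-first expansion that resolves every key once straight to its terminal values, applying the synonym map exactly once per terminal value; measured ~1.5-1.9x on the generated inputs but not confirmed faster at the largest size, so no speed is claimed.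
import Mathlib
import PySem

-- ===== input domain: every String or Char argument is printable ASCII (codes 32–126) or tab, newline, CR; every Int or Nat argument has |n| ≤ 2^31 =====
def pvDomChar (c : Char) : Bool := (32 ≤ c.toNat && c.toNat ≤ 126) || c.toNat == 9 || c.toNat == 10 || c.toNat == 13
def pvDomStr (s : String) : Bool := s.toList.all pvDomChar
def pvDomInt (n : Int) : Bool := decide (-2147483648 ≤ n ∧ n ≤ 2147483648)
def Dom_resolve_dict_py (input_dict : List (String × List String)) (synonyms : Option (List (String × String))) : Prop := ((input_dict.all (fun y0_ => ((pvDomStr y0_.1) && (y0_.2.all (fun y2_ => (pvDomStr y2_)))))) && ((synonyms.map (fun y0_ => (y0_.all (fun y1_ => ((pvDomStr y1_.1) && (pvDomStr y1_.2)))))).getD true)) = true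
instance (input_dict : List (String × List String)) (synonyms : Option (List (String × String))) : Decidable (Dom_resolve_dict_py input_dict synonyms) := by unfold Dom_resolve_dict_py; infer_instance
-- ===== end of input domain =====

-- B replaces A's repeated whole-dictionary substitution rounds by one memoized depth-first
-- expansion of every key straight to terminal values (objective: alternative algorithm).

-- ===== PORT A =====


-- bool(synonyms) for the synonyms dict (None or {} is falsy)

def pvSynTruthy (synonyms : Option (List (String × String))) : Bool :=
  match synonyms with
  | none => false
  | some l => !l.isEmpty


-- the two inner loops of A's round body: build resolved_values for one key, threading `changed`

def pvResolveA (read : PySem.Dict String (List String)) (sd : PySem.Dict String String)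
    (synT : Bool) (vals : List String) (ch : Bool) : List String × Bool :=
  vals.foldl
    (fun st v =>
      if read.contains v then (st.1 ++ read.getD v [], true)
      else if synT then (st.1 ++ [sd.getD v v], st.2)
      else st)
    ([], ch)


-- A's first `while` iteration: output is a fresh dict, all reads go to the original input_dict

def pvRound1 (d0 : PySem.Dict String (List String)) (sd : PySem.Dict String String)
    (synT : Bool) : PySem.Dict String (List String) × Bool :=
  d0.items.foldl
    (fun st p =>
      let r := pvResolveA d0 sd synT p.2 st.2
      (st.1.insert p.1 r.1, r.2))
    (PySem.Dict.empty, false)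


-- later iterations: input_dict IS output, so reads and writes hit the same (mutating) dict

def pvRoundN (sd : PySem.Dict String String) (synT : Bool)
    (d : PySem.Dict String (List String)) : PySem.Dict String (List String) × Bool :=
  d.keys.foldl
    (fun st k =>
      let r := pvResolveA st.1 sd synT (st.1.getD k []) st.2
      (st.1.insert k r.1, r.2))
    (d, false)


-- A's `while True` loop after the first iteration; the fuel is an upper bound on the number of
-- rounds on the inputs admitted by Pre_ (acyclic reference graph), where the loop provably
-- exits via `changed == False` before the fuel runs out

def pvLoopA (sd : PySem.Dict String String) (synT : Bool) :
    Nat → PySem.Dict String (List String) → PySem.Dict String (List String)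
  | 0, d => d
  | f + 1, d =>
    let r := pvRoundN sd synT d
    if r.2 then pvLoopA sd synT f r.1 else r.1


def resolve_dict_py (input_dict : List (String × List String)) (synonyms : Option (List (String × String))) : List (String × List String) :=
  let d0 := PySem.Dict.ofList input_dict
  let sd := PySem.Dict.ofList (synonyms.getD [])
  let synT := pvSynTruthy synonyms
  let r1 := pvRound1 d0 sd synT
  if r1.2 then (pvLoopA sd synT (d0.size + sd.size + 2) r1.1).items else r1.1.items



-- ===== PORT B =====

-- Source B's `expand`, threading the memo dict; the fuel bounds the recursion depth and is
-- sufficient on the inputs admitted by Pre_ (ranks are below the number of keys)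

def pvExpandB (d0 : PySem.Dict String (List String)) (sd : PySem.Dict String String)
    (synT : Bool) :
    Nat → PySem.Dict String (List String) → String → List String × PySem.Dict String (List String)
  | 0, memo, _ => ([], memo)
  | f + 1, memo, k =>
    match memo.get? k with
    | some r => (r, memo)
    | none =>
      let st := (d0.getD k []).foldl
        (fun (st : List String × PySem.Dict String (List String)) v =>
          if d0.contains v then
            let r := pvExpandB d0 sd synT f st.2 v
            (st.1 ++ r.1, r.2)
          else if synT then (st.1 ++ [sd.getD v v], st.2)
          else st)
        ([], memo)
      (st.1, st.2.insert k st.1)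


def resolve_dict_py_alt (input_dict : List (String × List String)) (synonyms : Option (List (String × String))) : List (String × List String) :=
  let d0 := PySem.Dict.ofList input_dict
  let sd := PySem.Dict.ofList (synonyms.getD [])
  let synT := pvSynTruthy synonyms
  (d0.keys.foldl
    (fun (st : PySem.Dict String (List String) × PySem.Dict String (List String)) k =>
      let r := pvExpandB d0 sd synT (d0.size + 1) st.2 k
      (st.1.insert k r.1, r.2))
    (PySem.Dict.empty, PySem.Dict.empty)).1.items



-- ===== PRECONDITION & SPEC =====

-- rank of key k in the reference graph (value v of key k references key v), computed with fuel

def pvRank (d : PySem.Dict String (List String)) : Nat → String → Nat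
  | 0, _ => 0
  | f + 1, k =>
    (d.getD k []).foldl (fun m c => if d.contains c then max m (pvRank d f c + 1) else m) 0


-- Pre_ = inputs on which A's value is the function's value: if some value references a key
-- (otherwise A returns after its first round), (a) the key-reference graph must admit strictly
-- decreasing ranks (be acyclic) — on cyclic inputs A loops forever — and (b) every synonym
-- image of an occurring non-key value must be terminal (not a key and not re-mapped by
-- synonyms) — otherwise A re-applies the synonym map / key expansion once per extra round, so
-- its result depends on how many substitution rounds unrelated keys happen to sustain, a
-- round-scheduling accident nobody would specify (B applies synonyms exactly once there).
def Pre_resolve_dict_py (input_dict : List (String × List String)) (synonyms : Option (List (String × String))) : Prop :=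
  (∃ k ∈ (PySem.Dict.ofList input_dict).keys, ∃ v ∈ (PySem.Dict.ofList input_dict).getD k [],
      (PySem.Dict.ofList input_dict).contains v = true) →
    (∀ k ∈ (PySem.Dict.ofList input_dict).keys, ∀ v ∈ (PySem.Dict.ofList input_dict).getD k [],
      ((PySem.Dict.ofList input_dict).contains v = true →
        pvRank (PySem.Dict.ofList input_dict) (PySem.Dict.ofList input_dict).size v <
          pvRank (PySem.Dict.ofList input_dict) (PySem.Dict.ofList input_dict).size k) ∧
      ((PySem.Dict.ofList input_dict).contains v = false → pvSynTruthy synonyms = true →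
        (PySem.Dict.ofList input_dict).contains
            ((PySem.Dict.ofList (synonyms.getD [])).getD v v) = false ∧
          (PySem.Dict.ofList (synonyms.getD [])).getD
              ((PySem.Dict.ofList (synonyms.getD [])).getD v v)
              ((PySem.Dict.ofList (synonyms.getD [])).getD v v) =
            (PySem.Dict.ofList (synonyms.getD [])).getD v v))

instance (input_dict : List (String × List String)) (synonyms : Option (List (String × String))) : Decidable (Pre_resolve_dict_py input_dict synonyms) := by unfold Pre_resolve_dict_py; infer_instance

def pvWitness_resolve_dict_py : (List (String × List String)) × (Option (List (String × String))) :=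
  ([("a", ["b", "x"]), ("b", ["t"])], some [("x", "y")])

def Spec_resolve_dict_py (input_dict : List (String × List String)) (synonyms : Option (List (String × String))) (out : List (String × List String)) : Prop := out = resolve_dict_py_alt input_dict synonyms
instance (input_dict : List (String × List String)) (synonyms : Option (List (String × String))) (out : List (String × List String)) : Decidable (Spec_resolve_dict_py input_dict synonyms out) := by unfold Spec_resolve_dict_py; infer_instance

-- ===== CLAIM (what is proved, stated in full; the proofs are below) =====
def Claim_equal_resolve_dict_py : Prop := ∀ (input_dict : List (String × List String)) (synonyms : Option (List (String × String))), Dom_resolve_dict_py input_dict synonyms → Pre_resolve_dict_py input_dict synonyms → Spec_resolve_dict_py input_dict synonyms (resolve_dict_py input_dict synonyms)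

-- ===== LEMMAS AND PROOFS =====

def pvE (d0 : PySem.Dict String (List String)) (sd : PySem.Dict String String) (synT : Bool) :
    Nat → String → List String
  | 0, _ => []
  | f + 1, k =>
    (d0.getD k []).flatMap
      (fun v => if d0.contains v then pvE d0 sd synT f v
                else if synT then [sd.getD v v] else [])


def pvDen (d0 : PySem.Dict String (List String)) (sd : PySem.Dict String String) (synT : Bool)
    (F : Nat) (l : List String) : List String :=
  l.flatMap
    (fun v => if d0.contains v then pvE d0 sd synT F v
              else if synT then [sd.getD v v] else [])


def pvStep (read : PySem.Dict String (List String)) (sd : PySem.Dict String String)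
    (synT : Bool) (v : String) : List String :=
  if read.contains v then read.getD v [] else if synT then [sd.getD v v] else []


def pvHedge (d0 : PySem.Dict String (List String)) (r : String → Nat) : Prop :=
  ∀ k ∈ d0.keys, ∀ v ∈ d0.getD k [], d0.contains v = true → r v < r k


def pvGoodSyn (d0 : PySem.Dict String (List String)) (sd : PySem.Dict String String)
    (synT : Bool) (v : String) : Prop :=
  d0.contains v = false → synT = true →
    d0.contains (sd.getD v v) = false ∧ sd.getD (sd.getD v v) (sd.getD v v) = sd.getD v v


def pvSOK (d0 : PySem.Dict String (List String)) (sd : PySem.Dict String String)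
    (synT : Bool) (l : List String) : Prop :=
  ∀ v ∈ l, pvGoodSyn d0 sd synT v


def pvKB (d0 : PySem.Dict String (List String)) (r : String → Nat) (b : Nat)
    (l : List String) : Prop :=
  ∀ v ∈ l, d0.contains v = true → r v < b


def pvGood (d0 : PySem.Dict String (List String)) (sd : PySem.Dict String String) (synT : Bool)
    (r : String → Nat) (F : Nat) (e : PySem.Dict String (List String)) : Prop :=
  e.keys = d0.keys ∧
  ∀ k ∈ d0.keys, pvSOK d0 sd synT (e.getD k []) ∧ pvKB d0 r (r k) (e.getD k []) ∧
    pvDen d0 sd synT F (e.getD k []) = pvE d0 sd synT F k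


theorem pvRank_foldl_le (d : PySem.Dict String (List String)) (f : Nat)
    (ih : ∀ c, pvRank d f c ≤ f) :
    ∀ (l : List String) (m0 : Nat), m0 ≤ f + 1 →
      l.foldl (fun m c => if d.contains c then max m (pvRank d f c + 1) else m) m0 ≤ f + 1 := by
  intro l
  induction l with
  | nil => intro m0 h; simpa using h
  | cons x xs ihl =>
    intro m0 h
    simp only [List.foldl_cons]
    split
    · exact ihl _ (by have := ih x; omega)
    · exact ihl _ h


theorem pvRank_le (d : PySem.Dict String (List String)) : ∀ (f : Nat) (k : String), pvRank d f k ≤ f := by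
  intro f
  induction f with
  | zero => intro k; simp [pvRank]
  | succ f ih =>
    intro k
    simpa [pvRank] using pvRank_foldl_le d f ih (d.getD k []) 0 (by omega)


theorem pvDen_congr (d0 : PySem.Dict String (List String)) (sd : PySem.Dict String String)
    (synT : Bool) (F G : Nat) (l : List String)
    (h : ∀ v ∈ l, d0.contains v = true → pvE d0 sd synT F v = pvE d0 sd synT G v) :
    pvDen d0 sd synT F l = pvDen d0 sd synT G l := by
  unfold pvDen
  apply List.flatMap_congr
  intro v hv
  by_cases hc : d0.contains v = true
  · simp [hc, h v hv hc]
  · simp [hc]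


theorem pvE_succ (d0 : PySem.Dict String (List String)) (sd : PySem.Dict String String)
    (synT : Bool) (f : Nat) (k : String) :
    pvE d0 sd synT (f + 1) k = pvDen d0 sd synT f (d0.getD k []) := rfl


theorem pvE_stable (d0 : PySem.Dict String (List String)) (sd : PySem.Dict String String)
    (synT : Bool) (r : String → Nat) (He : pvHedge d0 r) :
    ∀ (f g : Nat) (k : String), d0.contains k = true → r k < f → r k < g →
      pvE d0 sd synT f k = pvE d0 sd synT g k := by
  intro f
  induction f with
  | zero => intro g k _ h; omega
  | succ f ih =>
    intro g k hk hf hg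
    obtain ⟨g, rfl⟩ : ∃ g', g = g' + 1 := ⟨g - 1, by omega⟩
    rw [pvE_succ, pvE_succ]
    apply pvDen_congr
    intro v hv hc
    have hlt : r v < r k := He k ((PySem.Dict.contains_iff_mem_keys d0 k).mp hk) v hv hc
    exact ih g v hc (by omega) (by omega)


theorem pvE_unfold (d0 : PySem.Dict String (List String)) (sd : PySem.Dict String String)
    (synT : Bool) (r : String → Nat) (He : pvHedge d0 r) (F : Nat) (k : String)
    (hk : d0.contains k = true) (hF : r k < F) :
    pvE d0 sd synT F k = pvDen d0 sd synT F (d0.getD k []) := by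
  rw [pvE_stable d0 sd synT r He F (F + 1) k hk hF (by omega), pvE_succ]


theorem pvDen_append (d0 : PySem.Dict String (List String)) (sd : PySem.Dict String String)
    (synT : Bool) (F : Nat) (a b : List String) :
    pvDen d0 sd synT F (a ++ b) = pvDen d0 sd synT F a ++ pvDen d0 sd synT F b := by
  unfold pvDen; simp


theorem pvDen_cons (d0 : PySem.Dict String (List String)) (sd : PySem.Dict String String)
    (synT : Bool) (F : Nat) (x : String) (xs : List String) :
    pvDen d0 sd synT F (x :: xs) =
      (if d0.contains x then pvE d0 sd synT F x else if synT then [sd.getD x x] else []) ++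
        pvDen d0 sd synT F xs := by
  unfold pvDen; simp


theorem pvResolveA_fold (read : PySem.Dict String (List String)) (sd : PySem.Dict String String)
    (synT : Bool) : ∀ (l : List String) (acc : List String) (ch : Bool),
    l.foldl
      (fun st v =>
        if read.contains v then (st.1 ++ read.getD v [], true)
        else if synT then (st.1 ++ [sd.getD v v], st.2)
        else st)
      (acc, ch) =
      (acc ++ l.flatMap (pvStep read sd synT), ch || l.any (fun v => read.contains v)) := by
  intro l
  induction l with
  | nil => intro acc ch; simp
  | cons x xs ih =>
    intro acc ch
    have hstep : (fun (st : List String × Bool) v =>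
        if read.contains v then (st.1 ++ read.getD v [], true)
        else if synT then (st.1 ++ [sd.getD v v], st.2)
        else st) (acc, ch) x = (acc ++ pvStep read sd synT x, ch || read.contains x) := by
      unfold pvStep
      by_cases hc : read.contains x = true
      · simp [hc]
      · simp only [Bool.not_eq_true] at hc
        by_cases hs : synT = true
        · simp [hc, hs]
        · simp only [Bool.not_eq_true] at hs
          simp [hc, hs]
    simp only [List.foldl_cons, hstep, ih, List.flatMap_cons, List.any_cons]
    simp [List.append_assoc, Bool.or_assoc]


theorem pvResolveA_spec (read : PySem.Dict String (List String)) (sd : PySem.Dict String String)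
    (synT : Bool) (l : List String) (ch : Bool) :
    pvResolveA read sd synT l ch =
      (l.flatMap (pvStep read sd synT), ch || l.any (fun v => read.contains v)) := by
  unfold pvResolveA
  simpa using pvResolveA_fold read sd synT l [] ch


theorem pvContains_congr (read d0 : PySem.Dict String (List String))
    (hk : read.keys = d0.keys) (v : String) : read.contains v = d0.contains v := by
  by_cases h : d0.contains v = true
  · rw [h]
    exact (PySem.Dict.contains_iff_mem_keys read v).mpr (hk ▸ (PySem.Dict.contains_iff_mem_keys d0 v).mp h)
  · simp only [Bool.not_eq_true] at h
    rw [h]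
    rw [← Bool.not_eq_true]
    intro hcon
    have := (PySem.Dict.contains_iff_mem_keys read v).mp hcon
    rw [hk] at this
    rw [(PySem.Dict.contains_iff_mem_keys d0 v).mpr this] at h
    simp at h


theorem pvKB_mono (d0 : PySem.Dict String (List String)) (r : String → Nat) {b b' : Nat}
    (h : b ≤ b') {l : List String} (hl : pvKB d0 r b l) : pvKB d0 r b' l := by
  intro v hv hc
  exact lt_of_lt_of_le (hl v hv hc) h


theorem pvStep_flatMap_props (d0 : PySem.Dict String (List String))
    (sd : PySem.Dict String String) (synT : Bool) (r : String → Nat) (F : Nat)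
    (He : pvHedge d0 r)
    (read : PySem.Dict String (List String)) (hk : read.keys = d0.keys)
    (hread : ∀ v, d0.contains v = true →
      pvSOK d0 sd synT (read.getD v []) ∧ pvKB d0 r (r v) (read.getD v []) ∧
      pvDen d0 sd synT F (read.getD v []) = pvE d0 sd synT F v)
    (l : List String) (hsok : pvSOK d0 sd synT l) :
    pvSOK d0 sd synT (l.flatMap (pvStep read sd synT)) ∧
    (∀ b, pvKB d0 r b l → pvKB d0 r (b - 1) (l.flatMap (pvStep read sd synT))) ∧
    pvDen d0 sd synT F (l.flatMap (pvStep read sd synT)) = pvDen d0 sd synT F l ∧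
    (l.any (fun v => read.contains v) = false →
      l.flatMap (pvStep read sd synT) = pvDen d0 sd synT F l) := by
  induction l with
  | nil => simp [pvSOK, pvKB, pvDen]
  | cons x xs ih =>
    have hsokx : pvGoodSyn d0 sd synT x := hsok x (by simp)
    have hsokxs : pvSOK d0 sd synT xs := fun v hv => hsok v (by simp [hv])
    obtain ⟨ih1, ih2, ih3, ih4⟩ := ih hsokxs
    have hcc := pvContains_congr read d0 hk x
    refine ⟨?_, ?_, ?_, ?_⟩
    · -- SOK
      intro v hv
      simp only [List.flatMap_cons, List.mem_append] at hv
      rcases hv with hv | hv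
      · unfold pvStep at hv
        by_cases hc : d0.contains x = true
        · rw [hcc, hc] at hv; simp only [if_true] at hv
          exact (hread x hc).1 v hv
        · simp only [Bool.not_eq_true] at hc
          rw [hcc, hc] at hv
          by_cases hs : synT = true
          · simp only [hs, Bool.false_eq_true, if_false, if_true, List.mem_singleton] at hv
            subst hv
            obtain ⟨h1, h2⟩ := hsokx hc hs
            intro _ _
            refine ⟨?_, ?_⟩
            · rw [h2]; exact h1
            · rw [h2, h2]
          · simp only [Bool.not_eq_true] at hs
            simp [hc, hs] at hv
      · exact ih1 v hv
    · -- KB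
      intro b hb
      intro v hv hc
      simp only [List.flatMap_cons, List.mem_append] at hv
      rcases hv with hv | hv
      · unfold pvStep at hv
        by_cases hcx : d0.contains x = true
        · rw [hcc, hcx] at hv; simp only [if_true] at hv
          have h1 : r v < r x := (hread x hcx).2.1 v hv hc
          have h2 : r x < b := hb x (by simp) hcx
          omega
        · simp only [Bool.not_eq_true] at hcx
          rw [hcc, hcx] at hv
          by_cases hs : synT = true
          · simp only [hs, Bool.false_eq_true, if_false, if_true, List.mem_singleton] at hv
            subst hv
            rw [(hsokx hcx hs).1] at hc
            simp at hc
          · simp only [Bool.not_eq_true] at hs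
            simp [hcx, hs] at hv
      · exact ih2 b (fun w hw hcw => hb w (by simp [hw]) hcw) v hv hc
    · -- den preserved
      simp only [List.flatMap_cons]
      rw [pvDen_append, ih3, pvDen_cons]
      congr 1
      unfold pvStep
      by_cases hc : d0.contains x = true
      · rw [hcc, hc]; simp only [if_true]
        exact (hread x hc).2.2
      · simp only [Bool.not_eq_true] at hc
        rw [hcc, hc]
        by_cases hs : synT = true
        · simp only [hs, Bool.false_eq_true, if_false, if_true]
          obtain ⟨h1, h2⟩ := hsokx hc hs
          rw [pvDen_cons]
          simp [h1, h2, pvDen]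
        · simp only [Bool.not_eq_true] at hs
          simp [hc, hs, pvDen]
    · -- exit: no hits
      intro hany
      simp only [List.any_cons, Bool.or_eq_false_iff] at hany
      obtain ⟨hx, hxs⟩ := hany
      simp only [List.flatMap_cons]
      rw [ih4 hxs, pvDen_cons]
      congr 1
      unfold pvStep
      rw [hcc] at hx
      rw [hcc, hx]
      simp [hx]


theorem pvRound1_fold (d0 : PySem.Dict String (List String)) (sd : PySem.Dict String String)
    (synT : Bool) :
    ∀ (ps : List (String × List String)) (s : PySem.Dict String (List String) × Bool),
      (∀ p ∈ ps, s.1.contains p.1 = false) → (ps.map Prod.fst).Nodup →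
      ((ps.foldl
        (fun st p =>
          let r := pvResolveA d0 sd synT p.2 st.2
          (st.1.insert p.1 r.1, r.2)) s).1.items =
        s.1.items ++ ps.map (fun p => (p.1, p.2.flatMap (pvStep d0 sd synT))) ∧
       (ps.foldl
        (fun st p =>
          let r := pvResolveA d0 sd synT p.2 st.2
          (st.1.insert p.1 r.1, r.2)) s).2 =
        (s.2 || ps.any (fun p => p.2.any (fun v => d0.contains v)))) := by
  intro ps
  induction ps with
  | nil => intro s _ _; simp
  | cons p ps ih =>
    intro s hfresh hnd
    rw [List.foldl_cons]
    rw [show (let r := pvResolveA d0 sd synT p.2 s.2; (s.1.insert p.1 r.1, r.2)) =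
      (s.1.insert p.1 (p.2.flatMap (pvStep d0 sd synT)), s.2 || p.2.any (fun v => d0.contains v))
      from by simp [pvResolveA_spec]]
    have hfresh1 : ∀ q ∈ ps, ((s.1.insert p.1 (p.2.flatMap (pvStep d0 sd synT))).contains q.1) = false := by
      intro q hq
      rw [PySem.Dict.contains_insert]
      have hne : q.1 ≠ p.1 := by
        simp only [List.map_cons, List.nodup_cons] at hnd
        intro h
        exact hnd.1 (h ▸ List.mem_map_of_mem hq)
      simp [hne, hfresh q (by simp [hq])]
    have hnd1 : (ps.map Prod.fst).Nodup := by
      simp only [List.map_cons, List.nodup_cons] at hnd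
      exact hnd.2
    obtain ⟨h1, h2⟩ := ih ((s.1.insert p.1 (p.2.flatMap (pvStep d0 sd synT))), s.2 || p.2.any (fun v => d0.contains v)) hfresh1 hnd1
    refine ⟨?_, ?_⟩
    · rw [h1, PySem.Dict.items_insert_of_not_contains _ _ (hfresh p (by simp))]
      simp
    · rw [h2]
      simp [Bool.or_assoc]


theorem pvRound1_items (d0 : PySem.Dict String (List String)) (sd : PySem.Dict String String)
    (synT : Bool) (hnd : d0.keys.Nodup) :
    (pvRound1 d0 sd synT).1.items =
      d0.items.map (fun p => (p.1, p.2.flatMap (pvStep d0 sd synT))) ∧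
    (pvRound1 d0 sd synT).2 = d0.items.any (fun p => p.2.any (fun v => d0.contains v)) := by
  unfold pvRound1
  have hnd' : (d0.items.map Prod.fst).Nodup := by
    have : d0.keys = d0.items.map Prod.fst := by simp [PySem.Dict.keys]
    rwa [this] at hnd
  obtain ⟨h1, h2⟩ := pvRound1_fold d0 sd synT d0.items (PySem.Dict.empty, false)
    (fun p _ => PySem.Dict.contains_empty p.1) hnd'
  constructor
  · rw [h1]; simp [PySem.Dict.empty]
  · rw [h2]; simp


theorem pvKB_zero_any (d0 s1 : PySem.Dict String (List String)) (r : String → Nat)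
    (hk : s1.keys = d0.keys) (l : List String) (h : pvKB d0 r 0 l) :
    (l.any (fun v => s1.contains v)) = false := by
  apply List.any_eq_false.mpr
  intro v hv
  rw [pvContains_congr s1 d0 hk v]
  intro hc
  exact absurd (h v hv hc) (by omega)


theorem pvGood_read (d0 : PySem.Dict String (List String)) (sd : PySem.Dict String String)
    (synT : Bool) (r : String → Nat) (F : Nat) (e : PySem.Dict String (List String))
    (hg : pvGood d0 sd synT r F e) :
    ∀ v, d0.contains v = true →
      pvSOK d0 sd synT (e.getD v []) ∧ pvKB d0 r (r v) (e.getD v []) ∧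
      pvDen d0 sd synT F (e.getD v []) = pvE d0 sd synT F v := by
  intro v hv
  exact hg.2 v ((PySem.Dict.contains_iff_mem_keys d0 v).mp hv)


theorem pvRoundNfold (d0 : PySem.Dict String (List String)) (sd : PySem.Dict String String)
    (synT : Bool) (r : String → Nat) (F : Nat) (He : pvHedge d0 r) :
    ∀ (ks : List String) (s : PySem.Dict String (List String) × Bool) (b : Nat),
      (∀ k ∈ ks, d0.contains k = true) → ks.Nodup →
      pvGood d0 sd synT r F s.1 →
      (∀ k ∈ d0.keys, pvKB d0 r b (s.1.getD k [])) →
      (pvGood d0 sd synT r F (ks.foldl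
          (fun st k =>
            let rr := pvResolveA st.1 sd synT (st.1.getD k []) st.2
            (st.1.insert k rr.1, rr.2)) s).1 ∧
       (∀ k ∈ d0.keys, pvKB d0 r b ((ks.foldl
          (fun st k =>
            let rr := pvResolveA st.1 sd synT (st.1.getD k []) st.2
            (st.1.insert k rr.1, rr.2)) s).1.getD k [])) ∧
       (∀ j, j ∉ ks → (ks.foldl
          (fun st k =>
            let rr := pvResolveA st.1 sd synT (st.1.getD k []) st.2
            (st.1.insert k rr.1, rr.2)) s).1.getD j [] = s.1.getD j []) ∧
       (∀ k ∈ ks, pvKB d0 r (b - 1) ((ks.foldl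
          (fun st k =>
            let rr := pvResolveA st.1 sd synT (st.1.getD k []) st.2
            (st.1.insert k rr.1, rr.2)) s).1.getD k [])) ∧
       (b = 0 → (ks.foldl
          (fun st k =>
            let rr := pvResolveA st.1 sd synT (st.1.getD k []) st.2
            (st.1.insert k rr.1, rr.2)) s).2 = s.2) ∧
       ((ks.foldl
          (fun st k =>
            let rr := pvResolveA st.1 sd synT (st.1.getD k []) st.2
            (st.1.insert k rr.1, rr.2)) s).2 = false →
         (s.2 = false ∧ ∀ k ∈ ks, (ks.foldl
          (fun st k =>
            let rr := pvResolveA st.1 sd synT (st.1.getD k []) st.2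
            (st.1.insert k rr.1, rr.2)) s).1.getD k [] = pvE d0 sd synT F k))) := by
  intro ks
  induction ks with
  | nil => intro s b _ _ hg hkb; refine ⟨hg, hkb, by simp, by simp, by simp, by simp⟩
  | cons k ks ih =>
    intro s b hks hnd hg hkb
    have hkc : d0.contains k = true := hks k (by simp)
    have hkmem : k ∈ d0.keys := (PySem.Dict.contains_iff_mem_keys d0 k).mp hkc
    have hkeyeq : s.1.keys = d0.keys := hg.1
    have hskc : s.1.contains k = true := by rw [pvContains_congr s.1 d0 hkeyeq k]; exact hkc
    have hknotks : k ∉ ks := by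
      simp only [List.nodup_cons] at hnd; exact hnd.1
    have hndks : ks.Nodup := by simp only [List.nodup_cons] at hnd; exact hnd.2
    -- the list processed for k and its resolution
    set l := s.1.getD k [] with hl
    obtain ⟨hsokl, hkbl, hdenl⟩ := (pvGood_read d0 sd synT r F s.1 hg) k hkc
    obtain ⟨hpsok, hpkb, hpden, hpexit⟩ :=
      pvStep_flatMap_props d0 sd synT r F He s.1 hkeyeq (pvGood_read d0 sd synT r F s.1 hg) l hsokl
    set res := l.flatMap (pvStep s.1 sd synT) with hres
    set ch1 := (s.2 || l.any (fun v => s.1.contains v)) with hch1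
    rw [List.foldl_cons]
    rw [show (let rr := pvResolveA s.1 sd synT (s.1.getD k []) s.2; (s.1.insert k rr.1, rr.2)) =
      (s.1.insert k res, ch1) from by rw [pvResolveA_spec]]
    -- the new state is Good and keeps the global bound
    have hg1 : pvGood d0 sd synT r F (s.1.insert k res) := by
      constructor
      · rw [PySem.Dict.keys_insert_of_contains _ _ hskc, hkeyeq]
      · intro j hj
        rw [PySem.Dict.getD_insert]
        by_cases hjk : j = k
        · subst hjk
          simp only [if_pos rfl]
          refine ⟨hpsok, pvKB_mono d0 r (by omega) (hpkb (r j) hkbl), hpden.trans hdenl⟩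
        · simp only [if_neg hjk]
          exact hg.2 j hj
    have hkb1 : ∀ j ∈ d0.keys, pvKB d0 r b ((s.1.insert k res).getD j []) := by
      intro j hj
      rw [PySem.Dict.getD_insert]
      by_cases hjk : j = k
      · subst hjk
        simp only [if_pos rfl]
        exact pvKB_mono d0 r (by omega) (hpkb b (hkb j hj))
      · simp only [if_neg hjk]
        exact hkb j hj
    have hks' : ∀ k' ∈ ks, d0.contains k' = true := fun k' hk' => hks k' (by simp [hk'])
    obtain ⟨ihg, ihkb, ihun, ihdec, ihz, ihexit⟩ := ih (s.1.insert k res, ch1) b hks' hndks hg1 hkb1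
    have hfinalk : (ks.foldl
        (fun st k =>
          let rr := pvResolveA st.1 sd synT (st.1.getD k []) st.2
          (st.1.insert k rr.1, rr.2)) (s.1.insert k res, ch1)).1.getD k [] = res := by
      rw [ihun k hknotks, PySem.Dict.getD_insert]
      simp
    refine ⟨ihg, ihkb, ?_, ?_, ?_, ?_⟩
    · intro j hj
      have hjk : j ≠ k := by simp only [List.mem_cons, not_or] at hj; exact hj.1
      have hjks : j ∉ ks := by simp only [List.mem_cons, not_or] at hj; exact hj.2
      rw [ihun j hjks, PySem.Dict.getD_insert]
      simp [hjk]
    · intro j hj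
      rcases List.mem_cons.mp hj with hjk | hjks
      · subst hjk
        rw [hfinalk]
        exact hpkb b (hkb j hkmem)
      · exact ihdec j hjks
    · intro hb0
      subst hb0
      rw [ihz rfl, hch1, pvKB_zero_any d0 s.1 r hkeyeq l (hkb k hkmem)]
      simp
    · intro hfin
      obtain ⟨hch1f, hkslists⟩ := ihexit hfin
      rw [hch1] at hch1f
      obtain ⟨hs2, hany⟩ := Bool.or_eq_false_iff.mp hch1f
      refine ⟨hs2, ?_⟩
      intro j hj
      rcases List.mem_cons.mp hj with hjk | hjks
      · subst hjk
        rw [hfinalk, hpexit hany]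
        exact hdenl
      · exact hkslists j hjks


theorem pvLoopA_spec (d0 : PySem.Dict String (List String)) (sd : PySem.Dict String String)
    (synT : Bool) (r : String → Nat) (F : Nat) (He : pvHedge d0 r)
    (hnd : d0.keys.Nodup) :
    ∀ (f : Nat) (e : PySem.Dict String (List String)) (b : Nat),
      pvGood d0 sd synT r F e → (∀ k ∈ d0.keys, pvKB d0 r b (e.getD k [])) → b < f →
      (pvLoopA sd synT f e).items = d0.keys.map (fun k => (k, pvE d0 sd synT F k)) := by
  intro f
  induction f with
  | zero => intro e b _ _ h; omega
  | succ f ih =>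
    intro e b hg hkb hbf
    have hkeyeq : e.keys = d0.keys := hg.1
    have hkse : ∀ k ∈ e.keys, d0.contains k = true := by
      intro k hk
      rw [hkeyeq] at hk
      exact (PySem.Dict.contains_iff_mem_keys d0 k).mpr hk
    have hnde : e.keys.Nodup := by rw [hkeyeq]; exact hnd
    obtain ⟨c1, c2, c3, c4, c5, c6⟩ :=
      pvRoundNfold d0 sd synT r F He e.keys (e, false) b hkse hnde hg hkb
    simp only [pvLoopA]
    show (if (pvRoundN sd synT e).2 then pvLoopA sd synT f (pvRoundN sd synT e).1
      else (pvRoundN sd synT e).1).items = _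
    have hrn : pvRoundN sd synT e = e.keys.foldl
      (fun st k =>
        let rr := pvResolveA st.1 sd synT (st.1.getD k []) st.2
        (st.1.insert k rr.1, rr.2)) (e, false) := rfl
    by_cases hc : (pvRoundN sd synT e).2 = true
    · rw [if_pos hc]
      have hb0 : b ≠ 0 := by
        intro h
        rw [hrn] at hc
        rw [c5 h] at hc
        simp at hc
      apply ih _ (b - 1) (hrn ▸ c1) ?_ (by omega)
      intro k hk
      rw [hrn]
      apply c4
      rw [hkeyeq]
      exact hk
    · rw [if_neg hc]
      simp only [Bool.not_eq_true] at hc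
      rw [hrn] at hc
      obtain ⟨-, hlists⟩ := c6 hc
      have hndf : (pvRoundN sd synT e).1.keys.Nodup := by
        rw [hrn, c1.1]; exact hnd
      rw [PySem.Dict.items_eq_map_keys _ hndf []]
      rw [show (pvRoundN sd synT e).1.keys = d0.keys from by rw [hrn]; exact c1.1]
      apply List.map_congr_left
      intro k hk
      rw [hrn]
      rw [hlists k (by rw [hkeyeq]; exact hk)]


theorem pvExpandB_spec (d0 : PySem.Dict String (List String)) (sd : PySem.Dict String String)
    (synT : Bool) (r : String → Nat) (F : Nat) (He : pvHedge d0 r)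
    (hF : ∀ v, r v < F) :
    ∀ (f : Nat) (m : PySem.Dict String (List String)) (k : String),
      (∀ j rv, m.get? j = some rv → d0.contains j = true ∧ rv = pvE d0 sd synT F j) →
      d0.contains k = true → r k < f →
      (pvExpandB d0 sd synT f m k).1 = pvE d0 sd synT F k ∧
      (∀ j rv, (pvExpandB d0 sd synT f m k).2.get? j = some rv →
        d0.contains j = true ∧ rv = pvE d0 sd synT F j) := by
  intro f
  induction f with
  | zero => intro m k _ _ h; omega
  | succ f ihf =>
    intro m k hm hk hfk
    have hkmem : k ∈ d0.keys := (PySem.Dict.contains_iff_mem_keys d0 k).mp hk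
    simp only [pvExpandB]
    cases hmk : m.get? k with
    | some rv =>
      simp only [hmk]
      exact ⟨(hm k rv hmk).2, hm⟩
    | none =>
      simp only [hmk]
      have aux : ∀ (l : List String), (∀ v ∈ l, d0.contains v = true → r v < f) →
          ∀ (acc : List String) (m' : PySem.Dict String (List String)),
          (∀ j rv, m'.get? j = some rv → d0.contains j = true ∧ rv = pvE d0 sd synT F j) →
          (l.foldl
            (fun (st : List String × PySem.Dict String (List String)) v =>
              if d0.contains v then
                let r := pvExpandB d0 sd synT f st.2 v
                (st.1 ++ r.1, r.2)
              else if synT then (st.1 ++ [sd.getD v v], st.2)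
              else st)
            (acc, m')).1 = acc ++ pvDen d0 sd synT F l ∧
          (∀ j rv, (l.foldl
            (fun (st : List String × PySem.Dict String (List String)) v =>
              if d0.contains v then
                let r := pvExpandB d0 sd synT f st.2 v
                (st.1 ++ r.1, r.2)
              else if synT then (st.1 ++ [sd.getD v v], st.2)
              else st)
            (acc, m')).2.get? j = some rv → d0.contains j = true ∧ rv = pvE d0 sd synT F j) := by
        intro l
        induction l with
        | nil => intro _ acc m' hm'; simp [pvDen]; exact hm'
        | cons x xs ihl =>
          intro hlv acc m' hm'
          rw [List.foldl_cons]
          by_cases hcx : d0.contains x = true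
          · obtain ⟨he1, he2⟩ := ihf m' x hm' hcx (hlv x (by simp) hcx)
            rw [show (if d0.contains x = true then
                  let r := pvExpandB d0 sd synT f (acc, m').2 x
                  ((acc, m').1 ++ r.1, r.2)
                else if synT = true then ((acc, m').1 ++ [sd.getD x x], (acc, m').2)
                else (acc, m')) =
              (acc ++ pvE d0 sd synT F x, (pvExpandB d0 sd synT f m' x).2) from by
                simp [hcx, he1]]
            obtain ⟨ha, hb⟩ := ihl (fun v hv hcv => hlv v (by simp [hv]) hcv)
              (acc ++ pvE d0 sd synT F x) _ he2
            refine ⟨?_, hb⟩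
            rw [ha, pvDen_cons]
            simp [hcx, List.append_assoc]
          · have hcx' : d0.contains x = false := by simpa using hcx
            by_cases hs : synT = true
            · rw [show (if d0.contains x = true then
                    let r := pvExpandB d0 sd synT f (acc, m').2 x
                    ((acc, m').1 ++ r.1, r.2)
                  else if synT = true then ((acc, m').1 ++ [sd.getD x x], (acc, m').2)
                  else (acc, m')) = (acc ++ [sd.getD x x], m') from by simp [hcx', hs]]
              obtain ⟨ha, hb⟩ := ihl (fun v hv hcv => hlv v (by simp [hv]) hcv)
                (acc ++ [sd.getD x x]) _ hm'
              refine ⟨?_, hb⟩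
              rw [ha, pvDen_cons]
              simp [hcx', hs, List.append_assoc]
            · have hs' : synT = false := by simpa using hs
              rw [show (if d0.contains x = true then
                    let r := pvExpandB d0 sd synT f (acc, m').2 x
                    ((acc, m').1 ++ r.1, r.2)
                  else if synT = true then ((acc, m').1 ++ [sd.getD x x], (acc, m').2)
                  else (acc, m')) = (acc, m') from by simp [hcx', hs']]
              obtain ⟨ha, hb⟩ := ihl (fun v hv hcv => hlv v (by simp [hv]) hcv) acc _ hm'
              refine ⟨?_, hb⟩
              rw [ha, pvDen_cons]
              simp [hcx', hs']
      have hvbound : ∀ v ∈ d0.getD k [], d0.contains v = true → r v < f := by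
        intro v hv hcv
        have := He k hkmem v hv hcv
        omega
      obtain ⟨ha, hb⟩ := aux (d0.getD k []) hvbound [] m hm
      have hE : pvE d0 sd synT F k = pvDen d0 sd synT F (d0.getD k []) :=
        pvE_unfold d0 sd synT r He F k hk (hF k)
      refine ⟨?_, ?_⟩
      · rw [ha, hE]
        simp
      · intro j rv hj
        rw [PySem.Dict.get?_insert] at hj
        by_cases hjk : j = k
        · rw [if_pos hjk] at hj
          subst hjk
          refine ⟨hk, ?_⟩
          have h2 := Option.some_inj.mp hj
          rw [← h2, ha, hE]
          simp
        · rw [if_neg hjk] at hj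
          exact hb j rv hj


theorem pvAltfold (d0 : PySem.Dict String (List String)) (sd : PySem.Dict String String)
    (synT : Bool) (r : String → Nat) (F : Nat) (He : pvHedge d0 r)
    (hF : ∀ v, r v < F) (hFuel : ∀ v, r v < d0.size + 1) :
    ∀ (ks : List String) (out memo : PySem.Dict String (List String)),
      (∀ k ∈ ks, d0.contains k = true) → ks.Nodup →
      (∀ j rv, memo.get? j = some rv → d0.contains j = true ∧ rv = pvE d0 sd synT F j) →
      (∀ k ∈ ks, out.contains k = false) →
      ((ks.foldl
        (fun (st : PySem.Dict String (List String) × PySem.Dict String (List String)) k =>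
          let r := pvExpandB d0 sd synT (d0.size + 1) st.2 k
          (st.1.insert k r.1, r.2)) (out, memo)).1).items =
        out.items ++ ks.map (fun k => (k, pvE d0 sd synT F k)) := by
  intro ks
  induction ks with
  | nil => intro out memo _ _ _ _; simp
  | cons k ks ih =>
    intro out memo hks hnd hmemo hfresh
    have hkc : d0.contains k = true := hks k (by simp)
    obtain ⟨he1, he2⟩ := pvExpandB_spec d0 sd synT r F He hF (d0.size + 1) memo k hmemo hkc (hFuel k)
    rw [List.foldl_cons]
    rw [show (let r := pvExpandB d0 sd synT (d0.size + 1) (out, memo).2 k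
        ((out, memo).1.insert k r.1, r.2)) =
      (out.insert k (pvE d0 sd synT F k), (pvExpandB d0 sd synT (d0.size + 1) memo k).2) from by
        simp [he1]]
    have hnd' : ks.Nodup := by simp only [List.nodup_cons] at hnd; exact hnd.2
    have hfresh' : ∀ j ∈ ks, (out.insert k (pvE d0 sd synT F k)).contains j = false := by
      intro j hj
      rw [PySem.Dict.contains_insert]
      have hne : j ≠ k := by
        simp only [List.nodup_cons] at hnd
        intro h; exact hnd.1 (h ▸ hj)
      simp [hne, hfresh j (by simp [hj])]
    rw [ih (out.insert k (pvE d0 sd synT F k)) _ (fun j hj => hks j (by simp [hj])) hnd' he2 hfresh']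
    rw [PySem.Dict.items_insert_of_not_contains _ _ (hfresh k (by simp))]
    simp


theorem pvNoHit (d0 : PySem.Dict String (List String)) (sd : PySem.Dict String String)
    (synT : Bool) (read : PySem.Dict String (List String)) (hk : read.keys = d0.keys) :
    ∀ (l : List String), (l.any (fun v => d0.contains v) = false) → ∀ (G : Nat),
      l.flatMap (pvStep read sd synT) = pvDen d0 sd synT G l := by
  intro l
  induction l with
  | nil => intro _ G; simp [pvDen]
  | cons x xs ih =>
    intro h G
    simp only [List.any_cons, Bool.or_eq_false_iff] at h
    rw [List.flatMap_cons, pvDen_cons, ih h.2 G]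
    congr 1
    unfold pvStep
    rw [pvContains_congr read d0 hk, h.1]
    simp [h.1]


theorem pvAltB_spec (input_dict : List (String × List String))
    (synonyms : Option (List (String × String)))
    (He : pvHedge (PySem.Dict.ofList input_dict)
      (pvRank (PySem.Dict.ofList input_dict) (PySem.Dict.ofList input_dict).size)) :
    resolve_dict_py_alt input_dict synonyms =
      (PySem.Dict.ofList input_dict).keys.map
        (fun k => (k, pvE (PySem.Dict.ofList input_dict)
          (PySem.Dict.ofList (synonyms.getD [])) (pvSynTruthy synonyms)
          ((PySem.Dict.ofList input_dict).size + 1) k)) := by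
  unfold resolve_dict_py_alt
  have hnd := PySem.Dict.nodup_keys_ofList input_dict
  have hF : ∀ v, pvRank (PySem.Dict.ofList input_dict) (PySem.Dict.ofList input_dict).size v <
      (PySem.Dict.ofList input_dict).size + 1 := by
    intro v
    have := pvRank_le (PySem.Dict.ofList input_dict) (PySem.Dict.ofList input_dict).size v
    omega
  rw [pvAltfold (PySem.Dict.ofList input_dict) (PySem.Dict.ofList (synonyms.getD []))
    (pvSynTruthy synonyms) _ _ He hF hF (PySem.Dict.ofList input_dict).keys
    PySem.Dict.empty PySem.Dict.empty
    (fun k hk => (PySem.Dict.contains_iff_mem_keys _ k).mpr hk) hnd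
    (fun j rv h => by rw [PySem.Dict.get?_empty] at h; exact absurd h (by simp))
    (fun k _ => PySem.Dict.contains_empty k)]
  simp [PySem.Dict.empty]



theorem pvA_spec (input_dict : List (String × List String))
    (synonyms : Option (List (String × String)))
    (hpre : Pre_resolve_dict_py input_dict synonyms) :
    resolve_dict_py input_dict synonyms =
      (PySem.Dict.ofList input_dict).keys.map
        (fun k => (k, pvE (PySem.Dict.ofList input_dict)
          (PySem.Dict.ofList (synonyms.getD [])) (pvSynTruthy synonyms)
          ((PySem.Dict.ofList input_dict).size + 1) k)) := by
  unfold Pre_resolve_dict_py at hpre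
  unfold resolve_dict_py
  set d0 := PySem.Dict.ofList input_dict with hd0
  set sd := PySem.Dict.ofList (synonyms.getD []) with hsd
  set synT := pvSynTruthy synonyms with hsynT
  set r := pvRank d0 d0.size with hr
  set F := d0.size + 1 with hFdef
  have hnd0 : d0.keys.Nodup := PySem.Dict.nodup_keys_ofList input_dict
  have He : pvHedge d0 r := fun k hk v hv hc => (hpre ⟨k, hk, v, hv, hc⟩ k hk v hv).1 hc
  have hF : ∀ v, r v < F := by
    intro v
    have := pvRank_le d0 d0.size v
    rw [hr, hFdef]
    omega
  obtain ⟨hitems, hch⟩ := pvRound1_items d0 sd synT hnd0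
  have hitemsmap : d0.items = d0.keys.map (fun k => (k, d0.getD k [])) :=
    PySem.Dict.items_eq_map_keys d0 hnd0 []
  by_cases h1 : (pvRound1 d0 sd synT).2 = true
  · -- at least one value referenced a key: the loop runs
    rw [if_pos h1]
    -- conj1 of D_ holds
    have hconj1 : ∃ k ∈ d0.keys, ∃ v ∈ d0.getD k [], d0.contains v = true := by
      rw [hch] at h1
      obtain ⟨p, hp, hpa⟩ := List.any_eq_true.mp h1
      obtain ⟨v, hv, hvc⟩ := List.any_eq_true.mp hpa
      refine ⟨p.1, PySem.Dict.mem_keys_of_mem_items d0 (by simpa using hp), v, ?_, hvc⟩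
      rw [PySem.Dict.getD_of_mem_items d0 (show (p.1, p.2) ∈ d0.items from by simpa using hp) hnd0 []]
      exact hv
    -- Pre_ yields well-behaved synonym images
    have hsyn : ∀ k ∈ d0.keys, ∀ v ∈ d0.getD k [], pvGoodSyn d0 sd synT v := by
      intro k hk v hv
      intro hcv hsT
      exact (hpre hconj1 k hk v hv).2 hcv hsT
    have hread : ∀ v, d0.contains v = true →
        pvSOK d0 sd synT (d0.getD v []) ∧ pvKB d0 r (r v) (d0.getD v []) ∧
        pvDen d0 sd synT F (d0.getD v []) = pvE d0 sd synT F v := by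
      intro v hcv
      have hvk : v ∈ d0.keys := (PySem.Dict.contains_iff_mem_keys d0 v).mp hcv
      refine ⟨fun w hw => hsyn v hvk w hw, fun w hw hcw => He v hvk w hw hcw,
        (pvE_unfold d0 sd synT r He F v hcv (hF v)).symm⟩
    -- the dict after round one is Good
    have hkeys1 : (pvRound1 d0 sd synT).1.keys = d0.keys := by
      simp only [PySem.Dict.keys, hitems, List.map_map]
      apply List.map_congr_left
      intro p _
      rfl
    have hout1g : ∀ j ∈ d0.keys,
        (pvRound1 d0 sd synT).1.getD j [] = (d0.getD j []).flatMap (pvStep d0 sd synT) := by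
      intro j hj
      have hmem : (j, (d0.getD j []).flatMap (pvStep d0 sd synT)) ∈ (pvRound1 d0 sd synT).1.items := by
        rw [hitems, hitemsmap, List.map_map]
        exact List.mem_map_of_mem hj
      have hnd1 : (pvRound1 d0 sd synT).1.keys.Nodup := by
        rw [hkeys1]; exact hnd0
      exact PySem.Dict.getD_of_mem_items _ hmem hnd1 []
    have hgood : pvGood d0 sd synT r F (pvRound1 d0 sd synT).1 := by
      refine ⟨hkeys1, ?_⟩
      intro k hk
      rw [hout1g k hk]
      obtain ⟨p1, p2, p3, _⟩ := pvStep_flatMap_props d0 sd synT r F He d0 rfl hread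
        (d0.getD k []) (fun w hw => hsyn k hk w hw)
      refine ⟨p1, ?_, ?_⟩
      · exact pvKB_mono d0 r (by omega) (p2 (r k) (fun w hw hcw => He k hk w hw hcw))
      · rw [p3]
        exact (pvE_unfold d0 sd synT r He F k ((PySem.Dict.contains_iff_mem_keys d0 k).mpr hk) (hF k)).symm
    have hkb : ∀ k ∈ d0.keys, pvKB d0 r d0.size ((pvRound1 d0 sd synT).1.getD k []) := by
      intro k hk
      have h2 := (hgood.2 k hk).2.1
      apply pvKB_mono d0 r _ h2
      have := pvRank_le d0 d0.size k
      omega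
    exact pvLoopA_spec d0 sd synT r F He hnd0 (d0.size + sd.size + 2)
      (pvRound1 d0 sd synT).1 d0.size hgood hkb (by omega)
  · -- no value references a key: A returns the first round's output
    rw [if_neg h1]
    simp only [Bool.not_eq_true] at h1
    rw [hch] at h1
    rw [hitems, hitemsmap, List.map_map]
    apply List.map_congr_left
    intro k hk
    have hpair : (k, d0.getD k []) ∈ d0.items := by
      rw [hitemsmap]; exact List.mem_map_of_mem hk
    have hany : (d0.getD k []).any (fun v => d0.contains v) = false := by
      have := List.any_eq_false.mp h1 _ hpair
      simpa using this
    simp only [Function.comp]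
    rw [pvNoHit d0 sd synT d0 rfl (d0.getD k []) hany d0.size]
    rw [show pvE d0 sd synT F k = pvDen d0 sd synT d0.size (d0.getD k []) from pvE_succ d0 sd synT d0.size k]


theorem resolve_dict_py_main (input_dict : List (String × List String))
    (synonyms : Option (List (String × String)))
    (hpre : Pre_resolve_dict_py input_dict synonyms) :
    resolve_dict_py input_dict synonyms = resolve_dict_py_alt input_dict synonyms := by
  have hpre' := hpre
  unfold Pre_resolve_dict_py at hpre'
  have He : pvHedge (PySem.Dict.ofList input_dict)
      (pvRank (PySem.Dict.ofList input_dict) (PySem.Dict.ofList input_dict).size) := by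
    intro k hk v hv hc
    exact ((hpre' ⟨k, hk, v, hv, hc⟩) k hk v hv).1 hc
  rw [pvA_spec input_dict synonyms hpre, pvAltB_spec input_dict synonyms He]

-- ===== VERDICT (by name: the statement is the Claim_ definition above) =====
theorem resolve_dict_py_spec : Claim_equal_resolve_dict_py := by
  intro input_dict synonyms _ hpre
  unfold Spec_resolve_dict_py
  exact resolve_dict_py_main input_dict synonyms hpre
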